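-- pv_equiv track=rewrite | github.com/mrasov/synth-acc | substruct_generation.py | canonical_necklace
-- ===== SOURCE A (Python) =====
-- def canonical_necklace(seq):
--     """полная канонизация (вращения + отражения)"""
--     n = len(seq)
--     reps = []
--     current_fwd = list(seq)
--     current_rev = list(reversed(seq))
--     for _ in range(n):
--         reps.append(tuple(current_fwd))
--         reps.append(tuple(current_rev))
--         current_fwd = current_fwd[1:] + current_fwd[:1]
--         current_rev = current_rev[1:] + current_rev[:1]
--     return min(reps)
-- ===== SOURCE B (Python) =====
-- def canonical_necklace(seq):
--     """полная канонизация (вращения + отражения)"""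
--     n = len(seq)
--     fwd = list(seq) + list(seq)
--     rev = fwd[::-1]
--     return min(min(tuple(d[i:i + n]) for d in (fwd, rev)) for i in range(n))
-- ===== Notes on version B (the rewrite author's own statement) =====
-- stated objective: simpler
-- what changed: B replaces A's two mutably-rotated buffers and the collected list of 2n tuples by the doubling trick: it slices each rotation out of seq+seq and of its reversal and keeps a running minimum via nested min over generators, never materialising the reps list.
import Mathlib
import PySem

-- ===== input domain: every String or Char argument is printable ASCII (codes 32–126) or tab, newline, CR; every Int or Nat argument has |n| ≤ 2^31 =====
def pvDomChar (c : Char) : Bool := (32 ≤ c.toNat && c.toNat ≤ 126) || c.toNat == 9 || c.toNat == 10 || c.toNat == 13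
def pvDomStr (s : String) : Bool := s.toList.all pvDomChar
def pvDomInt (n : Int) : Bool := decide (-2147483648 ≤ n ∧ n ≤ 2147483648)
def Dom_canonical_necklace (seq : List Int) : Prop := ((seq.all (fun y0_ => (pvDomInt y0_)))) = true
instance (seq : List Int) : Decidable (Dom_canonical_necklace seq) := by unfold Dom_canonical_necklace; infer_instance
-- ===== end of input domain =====

-- B slices each rotation out of the doubled list seq+seq (and its reversal) and keeps a
-- running minimum, instead of A's mutable rotation of two buffers into a 2n-element list.
-- Objective: simpler. Equivalence is about the return value; neither mutates its argument.

-- ===== PORT A =====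
def canonical_necklace (seq : List Int) : List Int :=
  let n := seq.length
  let st := (List.range n).foldl
    (fun (st : List Int × List Int × List (List Int)) _ =>
      (PySem.List.slice st.1 (some 1) none ++ PySem.List.slice st.1 none (some 1),
       PySem.List.slice st.2.1 (some 1) none ++ PySem.List.slice st.2.1 none (some 1),
       st.2.2 ++ [st.1, st.2.1]))
    (seq, seq.reverse, ([] : List (List Int)))
  (PySem.List.min? st.2.2 (fun x => x)).getD []    -- Python's min raises on an empty reps list; Pre_ excludes that

-- ===== PORT B =====
def canonical_necklace_alt (seq : List Int) : List Int :=
  let n := seq.length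
  let fwd := seq ++ seq
  let rev := (PySem.List.slice? fwd none none (-1)).getD []
  (PySem.List.min?
    ((PySem.List.pyRange 0 (n : Int) 1).map (fun i =>
      (PySem.List.min?
        [PySem.List.slice fwd (some i) (some (i + (n : Int))),
         PySem.List.slice rev (some i) (some (i + (n : Int)))]
        (fun x => x)).getD []))
    (fun x => x)).getD []    -- Python's min raises on an empty generator; Pre_ excludes that

-- ===== PRECONDITION & SPEC =====
-- Python A (and B) raise ValueError (min of an empty sequence) exactly on the empty input.
def Pre_canonical_necklace (seq : List Int) : Prop := seq ≠ []
instance (seq : List Int) : Decidable (Pre_canonical_necklace seq) := by unfold Pre_canonical_necklace; infer_instance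
def pvWitness_canonical_necklace : List Int := [1, 2]

def Spec_canonical_necklace (seq : List Int) (out : List Int) : Prop := out = canonical_necklace_alt seq
instance (seq : List Int) (out : List Int) : Decidable (Spec_canonical_necklace seq out) := by unfold Spec_canonical_necklace; infer_instance

-- ===== CLAIM (what is proved, stated in full; the proofs are below) =====
def Claim_equal_canonical_necklace : Prop := ∀ (seq : List Int), Dom_canonical_necklace seq → Pre_canonical_necklace seq → Spec_canonical_necklace seq (canonical_necklace seq)

-- ===== LEMMAS AND PROOFS =====

-- the rotate-left step of A's loop is List.rotate 1
theorem pvRotStep (l : List Int) :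
    PySem.List.slice l (some 1) none ++ PySem.List.slice l none (some 1) = l.rotate 1 := by
  cases l with
  | nil => simp [pysem]
  | cons a t => simp [pysem, List.rotate_eq_drop_append_take (by simp : 1 ≤ (a :: t).length)]

-- invariant of A's loop
theorem pvLoopInv (k : Nat) (f r : List Int) (reps : List (List Int)) :
    (List.range k).foldl
      (fun (st : List Int × List Int × List (List Int)) _ =>
        (PySem.List.slice st.1 (some 1) none ++ PySem.List.slice st.1 none (some 1),
         PySem.List.slice st.2.1 (some 1) none ++ PySem.List.slice st.2.1 none (some 1),
         st.2.2 ++ [st.1, st.2.1])) (f, r, reps)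
    = (f.rotate k, r.rotate k,
       reps ++ (List.range k).flatMap (fun i => [f.rotate i, r.rotate i])) := by
  induction k with
  | zero => simp
  | succ k ih =>
      rw [List.range_succ, List.foldl_append, ih]
      simp [pvRotStep, List.rotate_rotate]

-- a rotation is a slice of the doubled list
theorem pvSliceRotate (s : List Int) (i m : Nat) (hi : i ≤ s.length) (hm : m = s.length) :
    List.take m (List.drop i (s ++ s)) = s.rotate i := by
  subst hm
  rw [List.drop_append_of_le_length hi, List.take_append,
      List.take_of_length_le (by simp), List.rotate_eq_drop_append_take hi]
  congr 1
  simp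
  omega

-- the ports elaborate min? at core's LT (List Int) instance; the PySem order lemmas are stated
-- at the (definitionally equal) LinearOrder instance — this bridge lets them apply
theorem pvMinBridge (xs : List (List Int)) :
    (PySem.List.min? xs fun x : List Int => x)
      = @PySem.List.min? (List Int) (List Int) LinearOrder.toPartialOrder.toLT
          (@LinearOrder.toDecidableLT _ _) xs (fun x => x) := by
  congr 1

-- min? over two lists agree when each dominates the other elementwise
theorem pvMinCongr (xs ys : List (List Int)) (hx : xs ≠ []) (hy : ys ≠ [])
    (h1 : ∀ x ∈ xs, ∃ y ∈ ys, y ≤ x) (h2 : ∀ y ∈ ys, ∃ x ∈ xs, x ≤ y) :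
    PySem.List.min? xs (fun x => x) = PySem.List.min? ys (fun x => x) := by
  rw [pvMinBridge xs, pvMinBridge ys]
  obtain ⟨mx, hmx⟩ : ∃ mx, @PySem.List.min? (List Int) (List Int) LinearOrder.toPartialOrder.toLT
      (@LinearOrder.toDecidableLT _ _) xs (fun x => x) = some mx := by
    cases h : @PySem.List.min? (List Int) (List Int) LinearOrder.toPartialOrder.toLT
        (@LinearOrder.toDecidableLT _ _) xs (fun x => x) with
    | none => exact absurd ((@PySem.List.min?_eq_none_iff (List Int) (List Int) LinearOrder.toPartialOrder.toLT (@LinearOrder.toDecidableLT _ _) xs _).mp h) hx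
    | some m => exact ⟨m, rfl⟩
  obtain ⟨my, hmy⟩ : ∃ my, @PySem.List.min? (List Int) (List Int) LinearOrder.toPartialOrder.toLT
      (@LinearOrder.toDecidableLT _ _) ys (fun x => x) = some my := by
    cases h : @PySem.List.min? (List Int) (List Int) LinearOrder.toPartialOrder.toLT
        (@LinearOrder.toDecidableLT _ _) ys (fun x => x) with
    | none => exact absurd ((@PySem.List.min?_eq_none_iff (List Int) (List Int) LinearOrder.toPartialOrder.toLT (@LinearOrder.toDecidableLT _ _) ys _).mp h) hy
    | some m => exact ⟨m, rfl⟩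
  rw [hmx, hmy]
  obtain ⟨y, hymem, hyx⟩ := h1 mx (@PySem.List.min?_mem (List Int) (List Int) LinearOrder.toPartialOrder.toLT (@LinearOrder.toDecidableLT _ _) xs _ mx hmx)
  obtain ⟨x, hxmem, hxy⟩ := h2 my (@PySem.List.min?_mem (List Int) (List Int) LinearOrder.toPartialOrder.toLT (@LinearOrder.toDecidableLT _ _) ys _ my hmy)
  have l1 : my ≤ mx := le_trans (PySem.List.min?_isMin hmy y hymem) hyx
  have l2 : mx ≤ my := le_trans (PySem.List.min?_isMin hmx x hxmem) hxy
  exact congrArg some (le_antisymm l2 l1)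

theorem canonical_necklace_eq_alt (seq : List Int) :
    canonical_necklace seq = canonical_necklace_alt seq := by
  unfold canonical_necklace canonical_necklace_alt
  rcases eq_or_ne seq [] with rfl | hne
  · decide
  · simp only [pvLoopInv, List.nil_append, PySem.List.slice?_none_none_neg_one,
      Option.getD_some, PySem.List.pyRange_zero_natCast, List.map_map]
    have hn : 0 < seq.length := List.length_pos_iff.mpr hne
    have hmap : ∀ i ∈ List.range seq.length,
        ((fun i : Int =>
            (PySem.List.min?
              [PySem.List.slice (seq ++ seq) (some i) (some (i + (seq.length : Int))),
               PySem.List.slice ((seq ++ seq).reverse) (some i) (some (i + (seq.length : Int)))]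
              (fun x => x)).getD []) ∘ (fun k : Nat => (k : Int))) i
          = min (seq.rotate i) (seq.reverse.rotate i) := by
      intro i hi
      have hi' := List.mem_range.mp hi
      simp only [Function.comp_apply]
      rw [List.reverse_append,
          PySem.List.slice_natCast_add (seq ++ seq) i seq.length,
          PySem.List.slice_natCast_add (seq.reverse ++ seq.reverse) i seq.length,
          pvSliceRotate seq i seq.length (le_of_lt hi') rfl,
          pvSliceRotate seq.reverse i seq.length (by simpa using le_of_lt hi') (by simp),
          pvMinBridge, PySem.List.min?_id_cons]
      simp [List.foldl]
    rw [List.map_congr_left hmap]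
    apply congrArg (fun o : Option (List Int) => o.getD [])
    apply pvMinCongr
    · simp only [ne_eq, List.flatMap_eq_nil_iff, List.mem_range]
      intro h
      exact absurd (h 0 hn) (by simp)
    · simp only [ne_eq, List.map_eq_nil_iff, List.range_eq_nil]
      omega
    · intro x hx
      simp only [List.mem_flatMap, List.mem_range] at hx
      obtain ⟨i, hi, hmem⟩ := hx
      refine ⟨min (seq.rotate i) (seq.reverse.rotate i),
        List.mem_map.mpr ⟨i, List.mem_range.mpr hi, rfl⟩, ?_⟩
      rcases List.mem_pair.mp hmem with h | h
      · rw [h]; exact min_le_left _ _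
      · rw [h]; exact min_le_right _ _
    · intro y hy
      obtain ⟨i, hi, rfl⟩ := List.mem_map.mp hy
      rcases le_total (seq.rotate i) (seq.reverse.rotate i) with h | h
      · exact ⟨seq.rotate i, List.mem_flatMap.mpr ⟨i, hi, by simp⟩, by rw [min_eq_left h]⟩
      · exact ⟨seq.reverse.rotate i, List.mem_flatMap.mpr ⟨i, hi, by simp⟩, by rw [min_eq_right h]⟩

-- ===== VERDICT (by name: the statement is the Claim_ definition above) =====
theorem canonical_necklace_spec : Claim_equal_canonical_necklace := by
  intro seq _ _
  exact canonical_necklace_eq_alt seq
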